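-- pv_equiv track=rewrite | github.com/pauljroma/pt-performance | clients/quiver/quiver_platform/zones/z07_data_access/tools/white_space_opportunity_mapper.py | _generate_innovation_opportunities
-- ===== SOURCE A (Python) =====
-- from typing import Dict, Any, List
-- from collections import Counter
--
-- def _generate_innovation_opportunities(patents: List[Dict]) -> List[Dict[str, Any]]:
--     """Generate specific innovation opportunities."""
--     opportunities = []
--
--     # Group by therapeutic area
--     area_counts = Counter(p.get('indication', 'Unknown') for p in patents)
--
--     # Rare disease opportunities (assuming low counts = rare/orphan)
--     for indication, count in area_counts.items():
--         if count == 1: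
--             opportunities.append({
--                 "type": "Rare Disease Opportunity",
--                 "indication": indication,
--                 "description": f"Only 1 patent in {indication} - potential orphan drug opportunity",
--                 "strategic_value": "HIGH - Orphan drug designation, extended exclusivity"
--             })
--
--     return opportunities[:10]
-- ===== SOURCE B (Python) =====
-- def _generate_innovation_opportunities(patents):
--     """Generate specific innovation opportunities."""
--     seen = set()
--     duplicates = set()
--     for p in patents:
--         ind = p.get('indication', 'Unknown')
--         if ind in seen:
--             duplicates.add(ind)
--         else:
--             seen.add(ind)
--
--     opportunities = []
--     for p in patents:
--         if len(opportunities) == 10: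
--             break
--         ind = p.get('indication', 'Unknown')
--         if ind not in duplicates:
--             opportunities.append({
--                 "type": "Rare Disease Opportunity",
--                 "indication": ind,
--                 "description": f"Only 1 patent in {ind} - potential orphan drug opportunity",
--                 "strategic_value": "HIGH - Orphan drug designation, extended exclusivity"
--             })
--     return opportunities
-- ===== Notes on version B (the rewrite author's own statement) =====
-- stated objective: alternative
-- what changed: Replaces A's Counter-then-filter-unique-keys strategy by a two-pass duplicates-set decomposition: one pass marks indications seen twice, a second pass over the patents emits the first ten non-duplicated indications directly, with no counting dictionary.
import Mathlib
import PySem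

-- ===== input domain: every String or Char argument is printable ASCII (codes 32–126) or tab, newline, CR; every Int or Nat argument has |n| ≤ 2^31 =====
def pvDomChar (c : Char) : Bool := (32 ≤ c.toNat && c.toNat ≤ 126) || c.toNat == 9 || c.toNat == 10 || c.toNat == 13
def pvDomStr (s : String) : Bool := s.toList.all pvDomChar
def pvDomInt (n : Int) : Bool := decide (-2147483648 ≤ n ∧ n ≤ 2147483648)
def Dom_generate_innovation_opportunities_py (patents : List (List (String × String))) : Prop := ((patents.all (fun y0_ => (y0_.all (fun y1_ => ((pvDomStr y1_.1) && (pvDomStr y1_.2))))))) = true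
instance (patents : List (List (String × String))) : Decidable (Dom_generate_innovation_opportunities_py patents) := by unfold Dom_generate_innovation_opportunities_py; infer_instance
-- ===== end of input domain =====

-- B replaces A's count-everything-then-filter-unique-keys strategy (Counter, then keep keys with
-- count 1) by a duplicates-set decomposition: one pass marking duplicated indications, a second
-- pass over the patents emitting each non-duplicated indication, stopping at 10 (objective: alternative).

-- shared by both ports: the dict literal appended per opportunity and the key extraction
-- p.get('indication', 'Unknown'), both of which appear verbatim in both Pythons
def pvOpp (ind : String) : List (String × String) :=
  [("type", "Rare Disease Opportunity"),
   ("indication", ind),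
   ("description", "Only 1 patent in " ++ ind ++ " - potential orphan drug opportunity"),
   ("strategic_value", "HIGH - Orphan drug designation, extended exclusivity")]

def pvInd (p : List (String × String)) : String :=
  PySem.Dict.getD (PySem.Dict.mk p) "indication" "Unknown"

-- ===== PORT A =====
-- area_counts = Counter(p.get('indication', 'Unknown') for p in patents);
-- for indication, count in area_counts.items(): if count == 1: opportunities.append({...});
-- return opportunities[:10]
def generate_innovation_opportunities_py (patents : List (List (String × String))) : List (List (String × String)) :=
  PySem.List.slice
    ((PySem.Dict.counter (patents.map (fun p => pvInd p))).items.foldl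
      (fun acc kc => if kc.2 == 1 then acc ++ [pvOpp kc.1] else acc) [])
    none (some 10)

-- ===== PORT B =====
-- first pass: if ind in seen: duplicates.add(ind) else: seen.add(ind)
def pvSeenDupStep (sd : PySem.Set String × PySem.Set String) (ind : String) :
    PySem.Set String × PySem.Set String :=
  if PySem.Set.contains sd.1 ind then (sd.1, PySem.Set.add sd.2 ind)
  else (PySem.Set.add sd.1 ind, sd.2)

def pvDups (patents : List (List (String × String))) : PySem.Set String :=
  (patents.foldl (fun sd p => pvSeenDupStep sd (pvInd p))
    (PySem.Set.empty, PySem.Set.empty)).2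

-- second pass: break at 10; if ind not in duplicates: opportunities.append({...})
def generate_innovation_opportunities_py_alt (patents : List (List (String × String))) : List (List (String × String)) :=
  patents.foldl
    (fun acc p =>
      if acc.length == 10 then acc
      else if !PySem.Set.contains (pvDups patents) (pvInd p) then acc ++ [pvOpp (pvInd p)]
      else acc) []

-- ===== PRECONDITION & SPEC =====
def Spec_generate_innovation_opportunities_py (patents : List (List (String × String))) (out : List (List (String × String))) : Prop := out = generate_innovation_opportunities_py_alt patents
instance (patents : List (List (String × String))) (out : List (List (String × String))) : Decidable (Spec_generate_innovation_opportunities_py patents out) := by unfold Spec_generate_innovation_opportunities_py; infer_instance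

-- ===== CLAIM (what is proved, stated in full; the proofs are below) =====
def Claim_equal_generate_innovation_opportunities_py : Prop := ∀ (patents : List (List (String × String))), Dom_generate_innovation_opportunities_py patents → Spec_generate_innovation_opportunities_py patents (generate_innovation_opportunities_py patents)

-- ===== LEMMAS AND PROOFS =====

-- membership in the duplicates set produced by B's first pass is "the key occurs at least twice"
lemma pv_dups_mem {α : Type} (key : α → String) :
    ∀ (l : List α) (s d : PySem.Set String) (k : String),
      (k ∈ (l.foldl (fun sd x => pvSeenDupStep sd (key x)) (s, d)).2 ↔
        k ∈ d ∨ 2 ≤ (l.map key).count k ∨ (k ∈ s ∧ k ∈ l.map key)) := by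
  intro l
  induction l with
  | nil => simp
  | cons hd t ih =>
    intro s d k
    simp only [List.foldl_cons, List.map_cons]
    by_cases hx : key hd ∈ s
    · have hstep : pvSeenDupStep (s, d) (key hd) = (s, PySem.Set.add d (key hd)) := by
        simp [pvSeenDupStep, hx]
      rw [hstep, ih]
      by_cases hk : k = key hd
      · rw [← hk]
        have h1 : (k :: t.map key).count k = (t.map key).count k + 1 := by
          simp
        have h2 : k ∈ k :: t.map key := List.mem_cons_self ..
        have hrfl : k = k := rfl
        have hks : k ∈ s := by rw [hk]; exact hx
        simp only [PySem.Set.mem_add, h1]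
        tauto
      · have h1 : (key hd :: t.map key).count k = (t.map key).count k := by
          simp [Ne.symm hk]
        have h2 : k ∈ key hd :: t.map key ↔ k ∈ t.map key := by
          simp [List.mem_cons, hk]
        simp only [PySem.Set.mem_add, h1, h2]
        tauto
    · have hstep : pvSeenDupStep (s, d) (key hd) = (PySem.Set.add s (key hd), d) := by
        simp [pvSeenDupStep, hx]
      rw [hstep, ih]
      by_cases hk : k = key hd
      · rw [← hk]
        have h1 : (k :: t.map key).count k = (t.map key).count k + 1 := by
          simp
        have h2 : k ∈ t.map key ↔ 1 ≤ (t.map key).count k := by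
          rw [← List.count_pos_iff]; omega
        have h3 : 2 ≤ (t.map key).count k + 1 ↔ 1 ≤ (t.map key).count k := by omega
        have h4 : k ∈ k :: t.map key := List.mem_cons_self ..
        have himp : 2 ≤ (t.map key).count k → 1 ≤ (t.map key).count k := by omega
        have hrfl : k = k := rfl
        have hks : k ∉ s := by rw [hk]; exact hx
        simp only [PySem.Set.mem_add, h1, h3, h2]
        tauto
      · have h1 : (key hd :: t.map key).count k = (t.map key).count k := by
          simp [Ne.symm hk]
        have h2 : k ∈ key hd :: t.map key ↔ k ∈ t.map key := by
          simp [List.mem_cons, hk]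
        simp only [PySem.Set.mem_add, h1, h2]
        tauto

-- B's second pass is a filtered, mapped, capped emission
lemma pv_foldl_cap {α β : Type} (q : α → Bool) (f : α → β) :
    ∀ (l : List α) (acc : List β), acc.length ≤ 10 →
    l.foldl (fun a x => if a.length == 10 then a else if q x then a ++ [f x] else a) acc
      = acc ++ (List.map f (List.filter q l)).take (10 - acc.length) := by
  intro l
  induction l with
  | nil => simp
  | cons x t ih =>
    intro acc h
    simp only [List.foldl_cons]
    by_cases h10 : acc.length = 10
    · rw [if_pos (by simp [h10]), ih acc h]
      simp [h10]
    · rw [if_neg (by simp [h10])]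
      by_cases hq : q x = true
      · rw [if_pos hq, ih _ (by simp; omega)]
        have hlen : 10 - acc.length = (10 - (acc.length + 1)) + 1 := by omega
        simp only [List.filter_cons, hq, if_pos, List.map_cons, hlen, List.take_succ_cons,
          List.length_append, List.length_cons, List.length_nil, List.append_assoc,
          List.cons_append, List.nil_append]
      · rw [if_neg hq, ih acc h]
        simp [hq]

-- the fold A runs over the Counter's items, on an items list of map shape
lemma pv_foldl_items (g : String → Int) :
    ∀ (l : List String) (acc : List (List (String × String))),
    List.foldl (fun acc kc => if kc.2 == 1 then acc ++ [pvOpp kc.1] else acc) acc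
        (l.map (fun k => (k, g k)))
      = acc ++ (l.filter (fun k => g k == 1)).map pvOpp := by
  intro l
  induction l with
  | nil => simp
  | cons x t ih =>
    intro acc
    simp only [List.map_cons, List.foldl_cons, List.filter_cons]
    by_cases hg : (g x == 1) = true
    · rw [if_pos hg, ih, if_pos hg]
      simp
    · rw [if_neg hg, ih, if_neg hg]

-- filtering by a predicate that only holds on unique elements ignores deduplication
lemma pv_filter_ofList (p : String → Bool) :
    ∀ (l s : List String), (∀ k, p k = true → l.count k + s.count k ≤ 1) →
    List.filter p (l.foldl PySem.Set.add s) = List.filter p s ++ List.filter p l := by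
  intro l
  induction l with
  | nil => simp
  | cons x t ih =>
    intro s h
    simp only [List.foldl_cons]
    by_cases hxs : x ∈ s
    · have hadd : PySem.Set.add s x = s := by simp [PySem.Set.add, hxs]
      have hpx : p x = false := by
        rcases hpv : p x
        · rfl
        · exfalso
          have hcount := h x hpv
          have h1 : 0 < s.count x := List.count_pos_iff.mpr hxs
          have h2 : 0 < (x :: t).count x := List.count_pos_iff.mpr (List.mem_cons_self ..)
          omega
      rw [hadd, ih s (fun k hk => by
        have h0 := h k hk
        have hle : t.count k ≤ (x :: t).count k := by
          rw [List.count_cons]; split <;> omega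
        omega)]
      simp [hpx]
    · have hadd : PySem.Set.add s x = s ++ [x] := by simp [PySem.Set.add, hxs]
      rw [hadd, ih (s ++ [x]) (fun k hk => by
        have h0 := h k hk
        rw [List.count_append, List.count_singleton]
        rw [List.count_cons] at h0
        by_cases hkx : k = x
        · subst hkx; simp at h0 ⊢; omega
        · simp [Ne.symm hkx] at h0 ⊢; omega)]
      simp only [List.filter_append, List.filter_cons, List.filter_nil, List.append_assoc]
      rcases hpv : p x <;> simp [hpv]

-- A computes: keys with count exactly 1, in first-occurrence order, capped at 10
lemma pv_A_eq (patents : List (List (String × String))) :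
    generate_innovation_opportunities_py patents =
      (((patents.map pvInd).filter
          (fun k => decide ((patents.map pvInd).count k = 1))).map pvOpp).take 10 := by
  unfold generate_innovation_opportunities_py
  rw [PySem.Dict.items_counter,
    pv_foldl_items (fun k => ((patents.map (fun p => pvInd p)).count k : Int))]
  have hsl : ∀ (xs : List (List (String × String))),
      PySem.List.slice xs none (some 10) = xs.take 10 := fun xs => by simp [pysem]
  rw [hsl]
  simp only [List.nil_append]
  congr 1
  have hfc : List.filter (fun k => (((patents.map (fun p => pvInd p)).count k : Int) == 1))
        (PySem.Set.ofList (patents.map (fun p => pvInd p)))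
      = List.filter (fun k => decide ((patents.map pvInd).count k = 1))
        (PySem.Set.ofList (patents.map pvInd)) := by
    refine List.filter_congr (fun k _ => ?_)
    by_cases h1 : (patents.map pvInd).count k = 1 <;>
      simp [h1, Nat.cast_eq_one]
  rw [hfc, PySem.Set.ofList_eq_foldl,
    pv_filter_ofList _ _ [] (fun k hk => by
      simp only [List.count_nil, Nat.add_zero]
      simp at hk
      omega)]
  simp

-- B computes the same list
lemma pv_B_eq (patents : List (List (String × String))) :
    generate_innovation_opportunities_py_alt patents =
      (((patents.map pvInd).filter
          (fun k => decide ((patents.map pvInd).count k = 1))).map pvOpp).take 10 := by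
  unfold generate_innovation_opportunities_py_alt
  rw [pv_foldl_cap (fun p => !PySem.Set.contains (pvDups patents) (pvInd p))
    (fun p => pvOpp (pvInd p)) patents [] (by simp)]
  simp only [List.nil_append, List.length_nil, Nat.sub_zero]
  congr 1
  have hdup : ∀ k, k ∈ pvDups patents ↔ 2 ≤ (patents.map pvInd).count k := by
    intro k
    unfold pvDups
    rw [pv_dups_mem pvInd]
    simp [PySem.Set.empty]
  have hcongr : List.filter (fun p => !PySem.Set.contains (pvDups patents) (pvInd p)) patents
      = List.filter (fun p => decide ((patents.map pvInd).count (pvInd p) = 1)) patents := by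
    refine List.filter_congr (fun p hp => ?_)
    have hone : 0 < (patents.map pvInd).count (pvInd p) :=
      List.count_pos_iff.mpr (List.mem_map_of_mem hp)
    rcases hc : PySem.Set.contains (pvDups patents) (pvInd p)
    · have hnm : pvInd p ∉ pvDups patents := by simpa using hc
      rw [hdup] at hnm
      simp only [Bool.not_false]
      symm
      simp only [decide_eq_true_eq]
      omega
    · have hm : pvInd p ∈ pvDups patents := by simpa using hc
      rw [hdup] at hm
      simp only [Bool.not_true]
      symm
      simp only [decide_eq_false_iff_not]
      omega
  rw [hcongr, List.filter_map, List.map_map]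
  simp [Function.comp_def]

-- ===== VERDICT (by name: the statement is the Claim_ definition above) =====
theorem generate_innovation_opportunities_py_spec : Claim_equal_generate_innovation_opportunities_py := by
  intro patents _
  unfold Spec_generate_innovation_opportunities_py
  rw [pv_A_eq, pv_B_eq]
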